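-- pv_equiv track=rewrite | github.com/davidiach/erdos97 | scripts/check_n9_base_apex_low_excess_ledgers.py | excess_distributions
-- ===== SOURCE A (Python) =====
-- from typing import Any, Iterable, Sequence
--
-- def binom2(value: int) -> int:
--     """Return binom(value, 2)."""
--
--     if value < 0:
--         raise ValueError(f"value must be nonnegative, got {value}")
--     return value * (value - 1) // 2
--
-- def integer_partitions(total: int, minimum: int = 1) -> Iterable[tuple[int, ...]]:
--     """Yield nondecreasing positive integer partitions of total."""
--
--     if total < 0:
--         raise ValueError(f"total must be nonnegative, got {total}")
--     if total == 0:
--         yield ()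
--         return
--     for first in range(minimum, total + 1):
--         for rest in integer_partitions(total - first, first):
--             yield (first, *rest)
--
-- def distance_profiles(n: int, witness_size: int) -> list[tuple[int, tuple[int, ...]]]:
--     """Return independently enumerated profile-excess rows."""
--
--     baseline = binom2(witness_size)
--     rows = []
--     for ascending_parts in integer_partitions(n - 1):
--         parts = tuple(reversed(ascending_parts))
--         if max(parts, default=0) < witness_size:
--             continue
--         excess = sum(binom2(part) for part in parts) - baseline
--         rows.append((excess, parts))
--     return sorted(rows, key=lambda row: (row[0], row[1]))
--
-- def base_apex_slack(n: int, witness_size: int) -> int: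
--     """Return the upper-minus-baseline base-apex slack."""
--
--     return n * (n - 2) - binom2(witness_size) * n
--
-- def excess_distributions(
--     n: int,
--     witness_size: int,
-- ) -> list[tuple[tuple[int, ...], int, int]]:
--     """Return sorted unlabeled profile-excess distributions within slack."""
--
--     slack = base_apex_slack(n, witness_size)
--     values = [
--         excess
--         for excess, _parts in distance_profiles(n, witness_size)
--         if excess <= slack
--     ]
--     out: list[tuple[tuple[int, ...], int, int]] = []
--
--     def search(start_index: int, slots_left: int, remaining: int, current: list[int]) -> None:
--         if slots_left == 0:
--             total = sum(current)
--             out.append((tuple(current), total, slack - total))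
--             return
--         for index in range(start_index, len(values)):
--             value = values[index]
--             if value > remaining:
--                 break
--             current.append(value)
--             search(index, slots_left - 1, remaining - value, current)
--             current.pop()
--
--     search(0, n, slack, [])
--     return sorted(out, key=lambda row: (row[1], row[0]))
-- ===== SOURCE B (Python) =====
-- from typing import Any, Iterable, Sequence
--
--
-- def binom2(value: int) -> int:
--     """Return binom(value, 2)."""
--
--     if value < 0:
--         raise ValueError(f"value must be nonnegative, got {value}")
--     return value * (value - 1) // 2
--
--
-- def integer_partitions(total: int, minimum: int = 1) -> Iterable[tuple[int, ...]]:
--     """Yield nondecreasing positive integer partitions of total."""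
--
--     if total < 0:
--         raise ValueError(f"total must be nonnegative, got {total}")
--     if total == 0:
--         yield ()
--         return
--     for first in range(minimum, total + 1):
--         for rest in integer_partitions(total - first, first):
--             yield (first, *rest)
--
--
-- def distance_profiles(n: int, witness_size: int) -> list[tuple[int, tuple[int, ...]]]:
--     """Return independently enumerated profile-excess rows."""
--
--     baseline = binom2(witness_size)
--     rows = []
--     for ascending_parts in integer_partitions(n - 1):
--         parts = tuple(reversed(ascending_parts))
--         if max(parts, default=0) < witness_size:
--             continue
--         excess = sum(binom2(part) for part in parts) - baseline
--         rows.append((excess, parts))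
--     return sorted(rows, key=lambda row: (row[0], row[1]))
--
--
-- def base_apex_slack(n: int, witness_size: int) -> int:
--     """Return the upper-minus-baseline base-apex slack."""
--
--     return n * (n - 2) - binom2(witness_size) * n
--
--
-- def excess_distributions(
--     n: int,
--     witness_size: int,
-- ) -> list[tuple[tuple[int, ...], int, int]]:
--     """Return sorted unlabeled profile-excess distributions within slack.
--
--     Breadth-first layered generation: partial combos (all excesses are
--     nonnegative, so any partial whose running total already exceeds the
--     slack can never be completed and is dropped layer by layer), instead
--     of A's recursive depth-first backtracking with a sorted-order break.
--     """
--
--     slack = base_apex_slack(n, witness_size)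
--     values = [
--         excess
--         for excess, _parts in distance_profiles(n, witness_size)
--         if excess <= slack
--     ]
--     partials: list[tuple[int, tuple[int, ...], int]] = [(0, (), 0)]
--     for _ in range(n):
--         partials = [
--             (i, combo + (values[i],), total + values[i])
--             for (start, combo, total) in partials
--             for i in range(start, len(values))
--             if total + values[i] <= slack
--         ]
--     out = [(combo, total, slack - total) for (_start, combo, total) in partials]
--     return sorted(out, key=lambda row: (row[1], row[0]))
-- ===== Notes on version B (the rewrite author's own statement) =====
-- stated objective: alternative
-- what changed: The recursive depth-first backtracking search (mutable current list, early break on the sorted values) is replaced by breadth-first layered generation: each pass extends every surviving partial combo by one value, dropping partials whose running total already exceeds the slack; helpers are unchanged.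
import Mathlib
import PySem

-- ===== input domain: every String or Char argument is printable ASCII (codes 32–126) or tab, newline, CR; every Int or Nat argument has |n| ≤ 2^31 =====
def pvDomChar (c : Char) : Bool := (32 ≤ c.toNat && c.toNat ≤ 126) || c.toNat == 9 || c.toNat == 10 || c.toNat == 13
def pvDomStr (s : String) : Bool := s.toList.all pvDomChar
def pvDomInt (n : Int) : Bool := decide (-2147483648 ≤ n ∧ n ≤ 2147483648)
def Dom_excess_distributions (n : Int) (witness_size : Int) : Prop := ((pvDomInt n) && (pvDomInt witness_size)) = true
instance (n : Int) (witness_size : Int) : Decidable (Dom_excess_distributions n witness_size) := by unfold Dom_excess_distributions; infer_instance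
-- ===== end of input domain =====

-- B replaces A's recursive depth-first backtracking (with its sorted-order break) by
-- breadth-first layered generation with a per-layer slack filter; helpers are identical.

-- ===== PORT A =====

-- 'if value < 0' is Python's 'raise ValueError'; all calls made under Pre_ pass value ≥ 0,
-- so the 0 returned there is never observed.
def pvBinom2 (value : Int) : Int :=
  if value < 0 then 0
  else PySem.Int.floordiv (value * (value - 1)) 2

-- fuel = total.toNat at the call site; each recursive call decreases total by first ≥ minimum ≥ 1,
-- so the fuel is never exhausted for the calls made (minimum = 1 initially, first ≥ minimum after).
def pvIntegerPartitions : Nat → Int → Int → List (List Int)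
  | 0, total, _ => if total = 0 then [[]] else []
  | fuel + 1, total, minimum =>
    if total = 0 then [[]]
    else (PySem.List.pyRange minimum (total + 1) 1).flatMap (fun first =>
      (pvIntegerPartitions fuel (total - first) first).map (fun rest => first :: rest))

def pvDistanceProfiles (n : Int) (witness_size : Int) : List (Int × List Int) :=
  let baseline := pvBinom2 witness_size
  let rows := (pvIntegerPartitions (n - 1).toNat (n - 1) 1).foldl (fun rows ascending_parts =>
    let parts := ascending_parts.reverse
    if PySem.List.maxD parts (fun x => x) 0 < witness_size then rows
    else rows ++ [((parts.map pvBinom2).sum - baseline, parts)]) []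
  PySem.List.sorted2 rows (fun r => r.1) (fun r => r.2)

def pvBaseApexSlack (n : Int) (witness_size : Int) : Int :=
  n * (n - 2) - pvBinom2 witness_size * n

mutual
  -- 'search(start_index, slots_left, remaining, current)'
  def pvSearch (values : List Int) (slack : Int) :
      Nat → Int → Int → List Int → List (List Int × Int × Int)
    | 0, _, _, current => [(current, current.sum, slack - current.sum)]
    | slots + 1, start, remaining, current =>
      pvSearchLoop values slack slots (PySem.List.pyRange start (values.length : Int) 1)
        remaining current
  termination_by slots _ _ _ => (slots, 0)
  -- the 'for index in range(start_index, len(values))' loop; '[]' on 'value > remaining' is 'break'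
  def pvSearchLoop (values : List Int) (slack : Int) :
      Nat → List Int → Int → List Int → List (List Int × Int × Int)
    | _, [], _, _ => []
    | slots, i :: rest, remaining, current =>
      let value := PySem.List.pyGetD values i 0   -- i ∈ range(start, len(values)) is in bounds
      if value > remaining then []
      else pvSearch values slack slots i (remaining - value) (current ++ [value])
             ++ pvSearchLoop values slack slots rest remaining current
  termination_by slots l _ _ => (slots, l.length + 1)
end

def excess_distributions (n : Int) (witness_size : Int) : List (List Int × Int × Int) :=
  let slack := pvBaseApexSlack n witness_size
  let values := ((pvDistanceProfiles n witness_size).filter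
      (fun r => decide (r.1 ≤ slack))).map (fun r => r.1)
  let out := pvSearch values slack n.toNat 0 slack []
  PySem.List.sorted2 out (fun row => row.2.1) (fun row => row.1)

-- ===== PORT B =====

-- one layer of the breadth-first pass: extend every partial (start, combo, total) by each
-- admissible value index i ≥ start with total + values[i] ≤ slack
def pvStep (values : List Int) (slack : Int) (partials : List (Int × List Int × Int)) :
    List (Int × List Int × Int) :=
  partials.flatMap (fun p =>
    ((PySem.List.pyRange p.1 (values.length : Int) 1).filter
        (fun i => decide (p.2.2 + PySem.List.pyGetD values i 0 ≤ slack))).map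
      (fun i => (i, p.2.1 ++ [PySem.List.pyGetD values i 0],
                 p.2.2 + PySem.List.pyGetD values i 0)))

def excess_distributions_alt (n : Int) (witness_size : Int) : List (List Int × Int × Int) :=
  let slack := pvBaseApexSlack n witness_size
  let values := ((pvDistanceProfiles n witness_size).filter
      (fun r => decide (r.1 ≤ slack))).map (fun r => r.1)
  let partials := (PySem.List.pyRange 0 n 1).foldl (fun ps _ => pvStep values slack ps)
      [((0 : Int), ([] : List Int), (0 : Int))]
  let out := partials.map (fun p => (p.2.1, p.2.2, slack - p.2.2))
  PySem.List.sorted2 out (fun row => row.2.1) (fun row => row.1)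

-- ===== PRECONDITION & SPEC =====

-- Python A raises ValueError when n ≤ 0 (integer_partitions(n - 1)) or witness_size < 0 (binom2);
-- on every other input it returns normally.
def Pre_excess_distributions (n : Int) (witness_size : Int) : Prop :=
  1 ≤ n ∧ 0 ≤ witness_size
instance (n : Int) (witness_size : Int) : Decidable (Pre_excess_distributions n witness_size) := by
  unfold Pre_excess_distributions; infer_instance

def pvWitness_excess_distributions : Int × Int := (3, 1)

def Spec_excess_distributions (n : Int) (witness_size : Int) (out : List (List Int × Int × Int)) : Prop := out = excess_distributions_alt n witness_size
instance (n : Int) (witness_size : Int) (out : List (List Int × Int × Int)) : Decidable (Spec_excess_distributions n witness_size out) := by unfold Spec_excess_distributions; infer_instance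

-- ===== CLAIM (what is proved, stated in full; the proofs are below) =====
def Claim_equal_excess_distributions : Prop := ∀ (n : Int) (witness_size : Int), Dom_excess_distributions n witness_size → Pre_excess_distributions n witness_size → Spec_excess_distributions n witness_size (excess_distributions n witness_size)

-- ===== LEMMAS AND PROOFS =====

-- reference enumeration: (last index chosen, value sequence) for all nondecreasing index
-- sequences of the given length starting at index ≥ st
def pvCwr (values : List Int) : Nat → Int → List (Int × List Int)
  | 0, st => [(st, [])]
  | s + 1, st => (PySem.List.pyRange st (values.length : Int) 1).flatMap
      (fun i => (pvCwr values s i).map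
        (fun q => (q.1, PySem.List.pyGetD values i 0 :: q.2)))

-- every combo in pvCwr has nonnegative sum (all values nonnegative)
lemma pvCwr_sum_nonneg (values : List Int) (hnn : ∀ x ∈ values, 0 ≤ x) :
    ∀ (s : Nat) (st : Int), 0 ≤ st → ∀ p ∈ pvCwr values s st, 0 ≤ p.2.sum := by
  intro s
  induction s with
  | zero =>
    intro st _ p hp
    simp only [pvCwr, List.mem_singleton] at hp
    simp [hp]
  | succ s ih =>
    intro st hst p hp
    simp only [pvCwr, List.mem_flatMap, List.mem_map] at hp
    obtain ⟨i, hi, q, hq, rfl⟩ := hp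
    rw [PySem.List.mem_pyRange_one] at hi
    have h0i : 0 ≤ i := le_trans hst hi.1
    have hv : 0 ≤ PySem.List.pyGetD values i 0 := by
      rw [PySem.List.pyGetD_eq_getElem values 0 h0i hi.2]
      exact hnn _ (List.getElem_mem _)
    have hq' := ih i h0i q hq
    simp only [List.sum_cons]
    omega

-- the loop body of A's search, over a tail range of the index list
lemma pvSearchLoop_char (values : List Int) (slack : Int)
    (hnn : ∀ x ∈ values, 0 ≤ x)
    (hmono : ∀ i j : Int, 0 ≤ i → i ≤ j → j < (values.length : Int) →
      PySem.List.pyGetD values i 0 ≤ PySem.List.pyGetD values j 0)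
    (s : Nat)
    (ihs : ∀ (st rem : Int) (cur : List Int), 0 ≤ st → 0 ≤ rem →
      pvSearch values slack s st rem cur
        = ((pvCwr values s st).filter (fun p => decide (p.2.sum ≤ rem))).map
            (fun p => (cur ++ p.2, (cur ++ p.2).sum, slack - (cur ++ p.2).sum))) :
    ∀ (k : Nat) (st rem : Int) (cur : List Int), 0 ≤ st → 0 ≤ rem →
      (values.length : Int) - st ≤ (k : Int) →
      pvSearchLoop values slack s (PySem.List.pyRange st (values.length : Int) 1) rem cur
        = (((PySem.List.pyRange st (values.length : Int) 1).flatMap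
              (fun i => (pvCwr values s i).map
                (fun q => (q.1, PySem.List.pyGetD values i 0 :: q.2)))).filter
            (fun p => decide (p.2.sum ≤ rem))).map
            (fun p => (cur ++ p.2, (cur ++ p.2).sum, slack - (cur ++ p.2).sum)) := by
  intro k
  induction k with
  | zero =>
    intro st rem cur hst hrem hk
    rw [PySem.List.pyRange_one_eq_nil (by exact_mod_cast by omega)]
    rw [pvSearchLoop]
    simp
  | succ k ih =>
    intro st rem cur hst hrem hk
    by_cases hLt : st < (values.length : Int)
    case neg =>
      rw [PySem.List.pyRange_one_eq_nil (by omega), pvSearchLoop]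
      simp
    case pos =>
      rw [PySem.List.pyRange_one_cons hLt]
      simp only [pvSearchLoop]
      by_cases hbr : PySem.List.pyGetD values st 0 > rem
      · rw [if_pos hbr]
        symm
        rw [List.map_eq_nil_iff, List.filter_eq_nil_iff]
        intro p hp
        rw [← PySem.List.pyRange_one_cons hLt] at hp
        simp only [List.mem_flatMap, List.mem_map] at hp
        obtain ⟨i, hi, q, hq, rfl⟩ := hp
        rw [PySem.List.mem_pyRange_one] at hi
        have h0i : 0 ≤ i := le_trans hst hi.1
        have hvv := hmono st i hst hi.1 hi.2
        have hqs := pvCwr_sum_nonneg values hnn s i h0i q hq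
        simp only [List.sum_cons, decide_eq_true_eq]
        omega
      · rw [if_neg hbr]
        rw [ihs st (rem - PySem.List.pyGetD values st 0)
            (cur ++ [PySem.List.pyGetD values st 0]) hst (by omega)]
        rw [ih (st + 1) rem cur (by omega) hrem (by omega)]
        rw [List.flatMap_cons, List.filter_append, List.map_append]
        congr 1
        rw [List.filter_map, List.map_map]
        simp only [Function.comp_def, List.sum_cons]
        rw [List.filter_congr
            (by intro q _; simp only [decide_eq_decide]; omega :
              ∀ q ∈ pvCwr values s st,
                (fun q => decide (q.2.sum ≤ rem - PySem.List.pyGetD values st 0)) q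
                  = (fun q => decide (PySem.List.pyGetD values st 0 + q.2.sum ≤ rem)) q)]
        apply List.map_congr_left
        intro q _
        simp

-- characterisation of A's pruned depth-first search
lemma pvSearch_char (values : List Int) (slack : Int)
    (hnn : ∀ x ∈ values, 0 ≤ x)
    (hmono : ∀ i j : Int, 0 ≤ i → i ≤ j → j < (values.length : Int) →
      PySem.List.pyGetD values i 0 ≤ PySem.List.pyGetD values j 0) :
    ∀ (slots : Nat) (st rem : Int) (cur : List Int), 0 ≤ st → 0 ≤ rem →
      pvSearch values slack slots st rem cur
        = ((pvCwr values slots st).filter (fun p => decide (p.2.sum ≤ rem))).map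
            (fun p => (cur ++ p.2, (cur ++ p.2).sum, slack - (cur ++ p.2).sum)) := by
  intro slots
  induction slots with
  | zero =>
    intro st rem cur hst hrem
    rw [pvSearch]
    simp [pvCwr, hrem]
  | succ s ih =>
    intro st rem cur hst hrem
    rw [pvSearch]
    rw [pvSearchLoop_char values slack hnn hmono s ih ((values.length : Int) - st).toNat
        st rem cur hst hrem (Int.self_le_toNat _)]
    conv_rhs => rw [pvCwr]

-- pvStep distributes over append, hence its iterates do
lemma pvStep_iterate_append (values : List Int) (slack : Int) :
    ∀ (k : Nat) (l1 l2 : List (Int × List Int × Int)),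
      (pvStep values slack)^[k] (l1 ++ l2)
        = (pvStep values slack)^[k] l1 ++ (pvStep values slack)^[k] l2 := by
  intro k
  induction k with
  | zero => intro l1 l2; simp
  | succ k ih =>
    intro l1 l2
    rw [Function.iterate_succ_apply, Function.iterate_succ_apply, Function.iterate_succ_apply]
    rw [show pvStep values slack (l1 ++ l2)
          = pvStep values slack l1 ++ pvStep values slack l2 by
        simp [pvStep, List.flatMap_append]]
    exact ih _ _

lemma pvStep_iterate_nil (values : List Int) (slack : Int) :
    ∀ k : Nat, (pvStep values slack)^[k] ([] : List (Int × List Int × Int)) = [] := by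
  intro k
  induction k with
  | zero => simp
  | succ k ih =>
    rw [Function.iterate_succ_apply, show pvStep values slack [] = [] by simp [pvStep]]
    exact ih

-- iterating pvStep over a mapped list splits into per-seed iterates
lemma pvStep_iterate_map (values : List Int) (slack : Int) (k : Nat)
    (g : Int → Int × List Int × Int) :
    ∀ l : List Int, (pvStep values slack)^[k] (l.map g)
      = l.flatMap (fun i => (pvStep values slack)^[k] [g i]) := by
  intro l
  induction l with
  | nil => simp [pvStep_iterate_nil]
  | cons i l ih =>
    rw [show (i :: l).map g = [g i] ++ l.map g by simp, pvStep_iterate_append, ih]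
    simp

-- a flatMap over a filtered list, when the dropped elements contribute nothing
lemma pvFlatMap_filter {α β : Type} (p : α → Bool) (F G : α → List β) :
    ∀ l : List α, (∀ x ∈ l, if p x = true then F x = G x else G x = []) →
      (l.filter p).flatMap F = l.flatMap G := by
  intro l
  induction l with
  | nil => intro _; simp
  | cons x l ih =>
    intro h
    have hx := h x List.mem_cons_self
    have hrest := ih (fun y hy => h y (List.mem_cons_of_mem _ hy))
    by_cases hp : p x = true
    · rw [if_pos hp] at hx
      simp [hp, hx, hrest]
    · rw [if_neg hp] at hx
      simp [hp, hx, hrest]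

-- characterisation of B's layered breadth-first pass
lemma pvStep_char (values : List Int) (slack : Int) (hnn : ∀ x ∈ values, 0 ≤ x) :
    ∀ (k : Nat) (st : Int) (c : List Int) (t : Int), 0 ≤ st → t ≤ slack →
      (pvStep values slack)^[k] [(st, c, t)]
        = ((pvCwr values k st).filter (fun p => decide (t + p.2.sum ≤ slack))).map
            (fun p => (p.1, c ++ p.2, t + p.2.sum)) := by
  intro k
  induction k with
  | zero =>
    intro st c t hst ht
    simp only [Function.iterate_zero, id_eq, pvCwr]
    simp [ht]
  | succ k ih =>
    intro st c t hst ht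
    rw [Function.iterate_succ_apply]
    rw [show pvStep values slack [(st, c, t)]
        = ((PySem.List.pyRange st (values.length : Int) 1).filter
            (fun i => decide (t + PySem.List.pyGetD values i 0 ≤ slack))).map
          (fun i => (i, c ++ [PySem.List.pyGetD values i 0],
                     t + PySem.List.pyGetD values i 0)) by simp [pvStep]]
    rw [pvStep_iterate_map]
    conv_rhs => rw [pvCwr]
    rw [List.filter_flatMap, List.map_flatMap]
    apply pvFlatMap_filter
    intro i hi
    rw [PySem.List.mem_pyRange_one] at hi
    have h0i : 0 ≤ i := le_trans hst hi.1
    by_cases hcond : t + PySem.List.pyGetD values i 0 ≤ slack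
    · rw [if_pos (by simpa using hcond)]
      rw [ih i (c ++ [PySem.List.pyGetD values i 0]) (t + PySem.List.pyGetD values i 0) h0i hcond]
      rw [List.filter_map, List.map_map]
      simp [Function.comp_def, List.sum_cons, add_assoc]
      rfl
    · rw [if_neg (by simpa using hcond)]
      rw [List.map_eq_nil_iff, List.filter_eq_nil_iff]
      intro q hq
      simp only [List.mem_map] at hq
      obtain ⟨q', hq', rfl⟩ := hq
      have hs := pvCwr_sum_nonneg values hnn k i h0i q' hq'
      simp only [List.sum_cons, decide_eq_true_eq]
      omega

-- a 'for' loop that ignores its element is an iterate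
lemma pvFoldl_const_iterate {α β : Type} (f : α → α) :
    ∀ (l : List β) (init : α), l.foldl (fun acc _ => f acc) init = f^[l.length] init := by
  intro l
  induction l with
  | nil => intro init; simp
  | cons b l ih =>
    intro init
    simp only [List.foldl_cons, List.length_cons]
    rw [ih, ← Function.iterate_succ_apply]

-- insertBy into a list pairwise-related by R stays pairwise-related, for a total 'before'
lemma pvInsertBy_pairwise {α : Type} (before : α → α → Bool) (R : α → α → Prop)
    (h1 : ∀ a b, before a b = true → R a b) (h2 : ∀ a b, before a b = false → R b a)
    (htrans : ∀ a b c, R a b → R b c → R a c) (x : α) :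
    ∀ ys : List α, ys.Pairwise R → (PySem.List.insertBy before x ys).Pairwise R := by
  intro ys
  induction ys with
  | nil => intro _; simp [PySem.List.insertBy]
  | cons y ys ih =>
    intro hp
    rw [List.pairwise_cons] at hp
    obtain ⟨hy, hys⟩ := hp
    rw [PySem.List.insertBy]
    by_cases hb : before x y = true
    · rw [if_pos hb]
      refine List.pairwise_cons.2 ⟨?_, List.pairwise_cons.2 ⟨hy, hys⟩⟩
      intro z hz
      rcases List.mem_cons.1 hz with rfl | hz'
      · exact h1 _ _ hb
      · exact htrans _ _ _ (h1 _ _ hb) (hy _ hz')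
    · rw [if_neg hb]
      refine List.pairwise_cons.2 ⟨?_, ih hys⟩
      intro z hz
      rcases (PySem.List.insertBy_mem_iff before x z ys).1 hz with rfl | hz'
      · exact h2 _ _ (Bool.eq_false_iff.2 hb)
      · exact hy _ hz'

-- sorted2 with first key into Int is pairwise nondecreasing in the first key
lemma pvSorted2_pairwise_fst (xs : List (Int × List Int)) :
    (PySem.List.sorted2 xs (fun r => r.1) (fun r => r.2)).Pairwise (fun a b => a.1 ≤ b.1) := by
  unfold PySem.List.sorted2
  simp only [if_neg (by simp : ¬ (false = true))]
  generalize hacc : ([] : List (Int × List Int)) = acc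
  have hacc' : acc.Pairwise (fun a b => a.1 ≤ b.1) := by simp [← hacc]
  clear hacc
  induction xs generalizing acc with
  | nil => simpa using hacc'
  | cons x xs ih =>
    simp only [List.foldl_cons]
    apply ih
    apply pvInsertBy_pairwise _ _ _ _ _ x acc hacc'
    · intro a b h
      simp only [Bool.or_eq_true, Bool.and_eq_true, Bool.not_eq_true', decide_eq_true_eq,
        decide_eq_false_iff_not] at h
      rcases h with h | ⟨h1', _⟩
      · exact le_of_lt h
      · omega
    · intro a b h
      simp only [Bool.or_eq_false_iff, Bool.and_eq_false_iff, Bool.not_eq_false',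
        decide_eq_true_eq, decide_eq_false_iff_not] at h
      omega
    · intro a b c hab hbc
      omega

-- all elements of a generated partition are ≥ minimum
lemma pvIntegerPartitions_ge (fuel : Nat) :
    ∀ (total minimum : Int) (l : List Int), l ∈ pvIntegerPartitions fuel total minimum →
      ∀ x ∈ l, minimum ≤ x := by
  induction fuel with
  | zero =>
    intro total minimum l hl x hx
    simp only [pvIntegerPartitions] at hl
    split at hl
    · simp only [List.mem_singleton] at hl
      subst hl
      simp at hx
    · simp at hl
  | succ fuel ih =>
    intro total minimum l hl x hx
    simp only [pvIntegerPartitions] at hl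
    split at hl
    · simp only [List.mem_singleton] at hl
      subst hl
      simp at hx
    · simp only [List.mem_flatMap, List.mem_map] at hl
      obtain ⟨first, hfirst, rest, hrest, rfl⟩ := hl
      rw [PySem.List.mem_pyRange_one] at hfirst
      rcases List.mem_cons.1 hx with rfl | hx'
      · exact hfirst.1
      · exact le_trans hfirst.1 (ih _ _ _ hrest _ hx')

lemma pvBinom2_nonneg (v : Int) : 0 ≤ pvBinom2 v := by
  unfold pvBinom2
  split
  · exact le_refl 0
  · rename_i h
    rw [PySem.Int.floordiv_eq_ediv_of_pos (by norm_num)]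
    refine Int.ediv_nonneg ?_ (by norm_num)
    rcases Int.lt_or_le v 1 with h1 | h1
    · have hv : v = 0 := by omega
      simp [hv]
    · exact mul_nonneg (by omega) (by omega)

lemma pvBinom2_mono {a b : Int} (ha : 0 ≤ a) (hab : a ≤ b) : pvBinom2 a ≤ pvBinom2 b := by
  unfold pvBinom2
  rw [if_neg (by omega), if_neg (by omega)]
  rw [PySem.Int.floordiv_eq_ediv_of_pos (by norm_num),
    PySem.Int.floordiv_eq_ediv_of_pos (by norm_num)]
  refine Int.ediv_le_ediv (by norm_num) ?_
  rcases eq_or_lt_of_le hab with rfl | hlt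
  · exact le_refl _
  · nlinarith [mul_nonneg (by omega : (0:Int) ≤ b - a) (by omega : (0:Int) ≤ b + a - 1)]

-- every row of distance_profiles has nonnegative excess (witness_size ≥ 0)
lemma pvDistanceProfiles_nonneg (n witness_size : Int) (hw : 0 ≤ witness_size) :
    ∀ r ∈ pvDistanceProfiles n witness_size, 0 ≤ r.1 := by
  intro r hr
  simp only [pvDistanceProfiles] at hr
  rw [List.Perm.mem_iff (PySem.List.sorted2_perm _ _ _ _)] at hr
  have hfun : (fun (rows : List (Int × List Int)) (ascending_parts : List Int) =>
        if PySem.List.maxD ascending_parts.reverse (fun x => x) 0 < witness_size then rows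
        else rows ++ [((ascending_parts.reverse.map pvBinom2).sum - pvBinom2 witness_size,
          ascending_parts.reverse)])
      = (fun rows ascending_parts =>
        if ¬ (PySem.List.maxD ascending_parts.reverse (fun x => x) 0 < witness_size) then
          rows ++ [((ascending_parts.reverse.map pvBinom2).sum - pvBinom2 witness_size,
            ascending_parts.reverse)]
        else rows) := by
    funext acc ap
    by_cases h : PySem.List.maxD ap.reverse (fun x => x) 0 < witness_size <;> simp [h]
  simp only [hfun] at hr
  rw [PySem.List.foldl_append_ite] at hr
  simp only [List.nil_append, List.mem_map, List.mem_filter] at hr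
  obtain ⟨ap, ⟨hap, hcond⟩, rfl⟩ := hr
  rw [decide_eq_true_eq, not_lt] at hcond
  have hge1 : ∀ x ∈ ap.reverse, (1 : Int) ≤ x := by
    intro x hx
    exact pvIntegerPartitions_ge _ _ _ _ hap _ (List.mem_reverse.1 hx)
  have hterms : ∀ y ∈ ap.reverse.map pvBinom2, (0 : Int) ≤ y := by
    intro y hy
    obtain ⟨x, _, rfl⟩ := List.mem_map.1 hy
    exact pvBinom2_nonneg x
  simp only
  cases hmx : PySem.List.max? ap.reverse (fun x => x) with
  | none =>
    have hnil : ap.reverse = [] := (PySem.List.max?_eq_none_iff _ _).1 hmx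
    rw [PySem.List.maxD, hmx] at hcond
    simp only [Option.getD_none] at hcond
    have hw0 : witness_size = 0 := le_antisymm hcond hw
    rw [hnil, hw0]
    simp [pvBinom2, PySem.Int.floordiv]
  | some m =>
    have hmem : m ∈ ap.reverse := PySem.List.max?_mem hmx
    rw [PySem.List.maxD, hmx] at hcond
    simp only [Option.getD_some] at hcond
    have h1 : pvBinom2 witness_size ≤ pvBinom2 m := pvBinom2_mono hw hcond
    have h2 : pvBinom2 m ≤ (ap.reverse.map pvBinom2).sum :=
      List.single_le_sum hterms _ (List.mem_map_of_mem hmem)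
    omega

-- the first components of distance_profiles are nondecreasing
lemma pvDistanceProfiles_sorted (n witness_size : Int) :
    (pvDistanceProfiles n witness_size).Pairwise (fun a b => a.1 ≤ b.1) := by
  simp only [pvDistanceProfiles]
  exact pvSorted2_pairwise_fst _

-- ===== VERDICT (by name: the statement is the Claim_ definition above) =====
theorem excess_distributions_spec : Claim_equal_excess_distributions := by
  intro n witness_size hdom hpre
  obtain ⟨hn, hw⟩ := hpre
  unfold Spec_excess_distributions excess_distributions excess_distributions_alt
  dsimp only
  set slack := pvBaseApexSlack n witness_size with hslackdef
  set dp := pvDistanceProfiles n witness_size with hdpdef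
  set values := (dp.filter (fun r => decide (r.1 ≤ slack))).map (fun r => r.1) with hvaluesdef
  have hnn : ∀ x ∈ values, 0 ≤ x := by
    intro x hx
    rw [hvaluesdef] at hx
    obtain ⟨r, hr, rfl⟩ := List.mem_map.1 hx
    exact pvDistanceProfiles_nonneg n witness_size hw r (List.mem_filter.1 hr).1
  have hle : ∀ x ∈ values, x ≤ slack := by
    intro x hx
    rw [hvaluesdef] at hx
    obtain ⟨r, hr, rfl⟩ := List.mem_map.1 hx
    simpa using (List.mem_filter.1 hr).2
  have hpw : values.Pairwise (· ≤ ·) := by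
    rw [hvaluesdef]
    exact List.pairwise_map.2
      ((pvDistanceProfiles_sorted n witness_size).filter _)
  have hmono : ∀ i j : Int, 0 ≤ i → i ≤ j → j < (values.length : Int) →
      PySem.List.pyGetD values i 0 ≤ PySem.List.pyGetD values j 0 := by
    intro i j h0 hij hj
    rw [PySem.List.pyGetD_eq_getElem values 0 h0 (by omega),
      PySem.List.pyGetD_eq_getElem values 0 (by omega) hj]
    rcases eq_or_lt_of_le hij with rfl | hlt
    · exact le_refl _
    · exact (List.pairwise_iff_getElem.1 hpw) i.toNat j.toNat (by omega) (by omega) (by omega)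
  by_cases hs : 0 ≤ slack
  · rw [pvSearch_char values slack hnn hmono n.toNat 0 slack [] (le_refl 0) hs]
    rw [pvFoldl_const_iterate (pvStep values slack) (PySem.List.pyRange 0 n 1)]
    rw [show (PySem.List.pyRange 0 n 1).length = n.toNat by
      rw [PySem.List.length_pyRange_one]; omega]
    rw [pvStep_char values slack hnn n.toNat 0 [] 0 (le_refl 0) hs]
    rw [List.map_map]
    congr 1
    rw [List.filter_congr
        (by intro p _; simp only [decide_eq_decide]; omega :
          ∀ p ∈ pvCwr values n.toNat 0,
            (fun p => decide (p.2.sum ≤ slack)) p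
              = (fun p => decide ((0 : Int) + p.2.sum ≤ slack)) p)]
    apply List.map_congr_left
    intro p _
    simp
  · have hvnil : values = [] :=
      List.eq_nil_iff_forall_not_mem.2
        (fun x hx => absurd (hle x hx) (by have := hnn x hx; omega))
    obtain ⟨m, hm⟩ : ∃ m, n.toNat = m + 1 := ⟨n.toNat - 1, by omega⟩
    rw [hvnil, hm, pvSearch]
    rw [show ((([] : List Int)).length : Int) = 0 by simp]
    rw [PySem.List.pyRange_one_eq_nil (le_refl 0), pvSearchLoop]
    rw [pvFoldl_const_iterate (pvStep [] slack) (PySem.List.pyRange 0 n 1)]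
    rw [show (PySem.List.pyRange 0 n 1).length = m + 1 by
      rw [PySem.List.length_pyRange_one]; omega]
    rw [Function.iterate_succ_apply]
    rw [show pvStep [] slack [((0 : Int), ([] : List Int), (0 : Int))] = [] by
      simp [pvStep, PySem.List.pyRange_one_eq_nil]]
    rw [pvStep_iterate_nil]
    simp
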